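-- pv_equiv track=rewrite | github.com/juandiramu/MaquinaTuring | asignarValor.py | cambiar
-- ===== SOURCE A (Python) =====
-- def cambiar(cadena):
--   for i in range(len(cadena)):
--     cadena=list(cadena)
--     if cadena[i]=="X":
--           cadena[i]='0'
--     if cadena[i]=="Y":
--           cadena[i]='1'
--     if cadena[i]=="S":
--           break;
--   return cadena
-- ===== SOURCE B (Python) =====
-- def cambiar(cadena):
--     idx = cadena.find('S')
--     if idx == -1:
--         idx = len(cadena)
--     prefix = ['0' if c == 'X' else '1' if c == 'Y' else c for c in cadena[:idx]]
--     return prefix + list(cadena[idx:])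
-- ===== Notes on version B (the rewrite author's own statement) =====
-- stated objective: faster
-- what changed: A walks indices and rebuilds list(cadena) on every iteration before an in-place per-character conditional rewrite with a break; B locates the first 'S' once with str.find, maps the prefix through one comprehension and concatenates the untouched suffix.
-- outside the precondition, e.g. on cambiar(''): A returns '', B returns []
import Mathlib
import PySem

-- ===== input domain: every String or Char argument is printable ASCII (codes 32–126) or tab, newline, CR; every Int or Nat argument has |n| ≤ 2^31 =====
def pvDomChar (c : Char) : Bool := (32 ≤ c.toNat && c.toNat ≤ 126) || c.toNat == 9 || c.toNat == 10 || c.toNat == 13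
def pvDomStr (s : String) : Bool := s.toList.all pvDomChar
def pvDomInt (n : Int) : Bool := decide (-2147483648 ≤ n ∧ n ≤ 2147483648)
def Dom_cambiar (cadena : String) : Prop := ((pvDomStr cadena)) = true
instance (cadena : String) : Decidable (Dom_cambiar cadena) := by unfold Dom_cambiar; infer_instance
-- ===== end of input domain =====

-- B replaces A's indexed loop (which re-copies the list every iteration, O(n^2)) with locate-first-'S' + map-the-prefix, O(n);
-- return-value equivalence is proved on nonempty strings (see Pre_cambiar).

-- ===== PORT A =====
-- the for-loop over range(len(cadena)) with in-place set and break
def cambiarLoop (cs : List Char) (i n : Nat) : List Char :=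
  if _h : i < n then
    let cs1 := if PySem.List.pyGet? cs (i : Int) = some 'X' then cs.set i '0' else cs
    let cs2 := if PySem.List.pyGet? cs1 (i : Int) = some 'Y' then cs1.set i '1' else cs1
    if PySem.List.pyGet? cs2 (i : Int) = some 'S' then cs2
    else cambiarLoop cs2 (i + 1) n
  else cs
termination_by n - i

def cambiar (cadena : String) : List String :=
  (cambiarLoop cadena.toList 0 cadena.toList.length).map (fun c => String.ofList [c])

-- ===== PORT B =====
def cambiar_alt (cadena : String) : List String :=
  let f := PySem.Str.find cadena "S"
  let idx : Int := if f = -1 then (cadena.toList.length : Int) else f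
  let pref := (PySem.Str.slice cadena none (some idx)).toList.map
    (fun c => if c = 'X' then "0" else if c = 'Y' then "1" else String.ofList [c])
  pref ++ (PySem.Str.slice cadena (some idx) none).toList.map (fun c => String.ofList [c])

-- ===== PRECONDITION & SPEC =====
-- Pre_ excludes only the empty string, on which Python A returns the string '' itself
-- (not a list — a value outside the declared return type List String).
def Pre_cambiar (cadena : String) : Prop := cadena ≠ ""
instance (cadena : String) : Decidable (Pre_cambiar cadena) := by unfold Pre_cambiar; infer_instance
def pvWitness_cambiar : String := ("XYSab")

def Spec_cambiar (cadena : String) (out : List String) : Prop := out = cambiar_alt cadena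
instance (cadena : String) (out : List String) : Decidable (Spec_cambiar cadena out) := by unfold Spec_cambiar; infer_instance

-- ===== CLAIM (what is proved, stated in full; the proofs are below) =====
def Claim_equal_cambiar : Prop := ∀ (cadena : String), Dom_cambiar cadena → Pre_cambiar cadena → Spec_cambiar cadena (cambiar cadena)

-- ===== LEMMAS AND PROOFS =====

-- the per-character rewrite A applies
def rch (c : Char) : Char := if c = 'X' then '0' else if c = 'Y' then '1' else c

-- structural characterisation of A's loop body
def gSpec : List Char → List Char
  | [] => []
  | c :: t => if c = 'S' then c :: t else rch c :: gSpec t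

theorem cambiarLoop_eq_gSpec : ∀ (rest pre : List Char),
    cambiarLoop (pre ++ rest) pre.length (pre.length + rest.length) = pre ++ gSpec rest := by
  intro rest
  induction rest with
  | nil => intro pre; simp [cambiarLoop, gSpec]
  | cons c t ih =>
    intro pre
    rw [cambiarLoop]
    have hlt : pre.length < pre.length + (c :: t).length := by simp
    have hget : ∀ (x : Char) (t' : List Char),
        PySem.List.pyGet? (pre ++ x :: t') (pre.length : Int) = some x := by
      intro x t'; simp [List.getElem?_append_right]
    have hset : ∀ x : Char, (pre ++ c :: t).set pre.length x = pre ++ x :: t := by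
      intro x; rw [List.set_append]; simp
    have tail : ∀ (x : Char),
        cambiarLoop (pre ++ x :: t) (pre.length + 1) (pre.length + (c :: t).length)
          = pre ++ x :: gSpec t := by
      intro x
      have h1 : pre ++ x :: t = (pre ++ [x]) ++ t := by simp
      have h2 : pre.length + 1 = (pre ++ [x]).length := by simp
      have h3 : pre.length + (c :: t).length = (pre ++ [x]).length + t.length := by
        simp; omega
      rw [h1, h2, h3, ih (pre ++ [x])]
      simp
    rw [dif_pos hlt]
    by_cases hx : c = 'X'
    · subst hx
      simp only [hget, hset, Option.some.injEq, Char.reduceEq, reduceIte, tail '0']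
      simp [gSpec, rch]
    · by_cases hy : c = 'Y'
      · subst hy
        simp only [hget, hset, Option.some.injEq, Char.reduceEq, reduceIte, tail '1']
        simp [gSpec, rch]
      · by_cases hs : c = 'S'
        · subst hs
          simp only [hget, hset, Option.some.injEq, Char.reduceEq, reduceIte]
          simp [gSpec]
        · simp only [hget, hset, Option.some.injEq, hx, hy, hs, reduceIte, if_false, tail c]
          simp [gSpec, rch, hs, hx, hy]

theorem gSpec_take_drop : ∀ (cs : List Char) (k : Nat),
    (∀ i, i < k → cs[i]? ≠ some 'S') → (k = cs.length ∨ cs[k]? = some 'S') →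
    gSpec cs = (cs.take k).map rch ++ cs.drop k := by
  intro cs
  induction cs with
  | nil => intro k _ hk; simp [gSpec]
  | cons c t ih =>
    intro k hlt hk
    cases k with
    | zero =>
      rcases hk with h | h
      · simp at h
      · simp at h; simp [gSpec, h]
    | succ k =>
      have hc : c ≠ 'S' := by
        have := hlt 0 (by omega); simpa using this
      simp only [gSpec, if_neg hc, List.take_succ_cons, List.drop_succ_cons, List.map_cons,
        List.cons_append]
      congr 1
      apply ih k
      · intro i hi; have := hlt (i + 1) (by omega); simpa using this
      · rcases hk with h | h
        · left; simpa using h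
        · right; simpa using h

theorem singleton_prefix_drop {cs : List Char} {j : Nat} (h : ['S'] <+: cs.drop j) :
    cs[j]? = some 'S' := by
  rcases h with ⟨t, ht⟩
  have : (cs.drop j)[0]? = some 'S' := by rw [← ht]; rfl
  simpa [List.getElem?_drop] using this

theorem cambiar_char_level (cs : List Char) :
    gSpec cs = (cs.take (if PySem.Chars.find cs ['S'] = -1 then cs.length
                  else (PySem.Chars.find cs ['S']).toNat)).map rch ++
               cs.drop (if PySem.Chars.find cs ['S'] = -1 then cs.length
                  else (PySem.Chars.find cs ['S']).toNat) := by
  by_cases hf : PySem.Chars.find cs ['S'] = -1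
  · simp only [hf, if_pos rfl]
    apply gSpec_take_drop
    · intro i hi hsome
      have hmem : 'S' ∈ cs := by
        have := List.getElem?_eq_some_iff.mp hsome
        rcases this with ⟨h1, h2⟩
        exact h2 ▸ List.getElem_mem h1
      have hinf : ['S'] <:+: cs := by
        rcases List.append_of_mem hmem with ⟨s, t, rfl⟩
        exact ⟨s, t, by simp⟩
      exact (PySem.Chars.find_eq_neg_one_iff cs ['S']).mp hf hinf
    · exact Or.inl rfl
  · simp only [hf, if_neg hf]
    have hpos : 0 ≤ PySem.Chars.find cs ['S'] := by
      have := PySem.Chars.neg_one_le_find cs ['S']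
      omega
    obtain ⟨hpre, hmin⟩ := PySem.Chars.find_spec hpos
    apply gSpec_take_drop
    · intro i hi hsome
      apply hmin i hi
      refine ⟨cs.drop (i + 1), ?_⟩
      have : cs.drop i = 'S' :: cs.drop (i + 1) := by
        rcases List.getElem?_eq_some_iff.mp hsome with ⟨h1, h2⟩
        rw [List.drop_eq_getElem_cons h1, h2]
      simp [this]
    · right; exact singleton_prefix_drop hpre

theorem map_comp_rch (l : List Char) :
    (l.map rch).map (fun c => String.ofList [c]) =
    l.map (fun c => if c = 'X' then "0" else if c = 'Y' then "1" else String.ofList [c]) := by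
  rw [List.map_map]
  apply List.map_congr_left
  intro c _
  by_cases hx : c = 'X'
  · subst hx; rfl
  · by_cases hy : c = 'Y'
    · subst hy; rfl
    · simp [Function.comp, rch, hx, hy]

-- ===== VERDICT (by name: the statement is the Claim_ definition above) =====
theorem cambiar_spec : Claim_equal_cambiar := by
  intro cadena _ _
  unfold Spec_cambiar cambiar cambiar_alt
  set cs := cadena.toList with hcs
  set f := PySem.Str.find cadena "S" with hf
  have hfeq : f = PySem.Chars.find cs ['S'] := by
    rw [hf, hcs]; simp [PySem.Str.find]
  have hloop : cambiarLoop cs 0 cs.length = gSpec cs := by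
    have := cambiarLoop_eq_gSpec cs []
    simpa using this
  set k : Nat := if PySem.Chars.find cs ['S'] = -1 then cs.length
                 else (PySem.Chars.find cs ['S']).toNat with hk
  have hidx : (if f = -1 then (cs.length : Int) else f) = (k : Int) := by
    rw [hfeq, hk]
    by_cases h : PySem.Chars.find cs ['S'] = -1
    · simp [h]
    · have hpos : 0 ≤ PySem.Chars.find cs ['S'] := by
        have := PySem.Chars.neg_one_le_find cs ['S']
        omega
      simp [h, Int.toNat_of_nonneg hpos]
  have hslice1 : (PySem.Str.slice cadena none (some (if f = -1 then (cs.length : Int) else f))).toList = cs.take k := by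
    rw [hidx]
    simp [PySem.Str.slice, PySem.List.slice_to_natCast]
    rfl
  have hslice2 : (PySem.Str.slice cadena (some (if f = -1 then (cs.length : Int) else f)) none).toList = cs.drop k := by
    rw [hidx]
    simp [PySem.Str.slice, PySem.List.slice_from_natCast]
    rfl
  simp only []
  rw [hslice1, hslice2, hloop, cambiar_char_level cs, ← hk]
  rw [List.map_append, map_comp_rch]
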